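-- pv_equiv track=rewrite | github.com/simon-marcus/parameter-golf-fork | watch_tokenizer_autoresearch.py | detect_active_status
-- ===== SOURCE A (Python) =====
-- def detect_active_status(log_tail: list[str]) -> str:
--     for line in reversed(log_tail):
--         if "review:start" in line:
--             return "reviewing"
--         if "experiment:" in line and ":start" in line:
--             return "training/evaluating"
--         if "run:done" in line:
--             return "idle"
--         if "run:start" in line:
--             return "starting"
--     return "unknown"
-- ===== SOURCE B (Python) =====
-- def detect_active_status(log_tail: list[str]) -> str:
--     def line_status(line):
--         if "review:start" in line:
--             return "reviewing"
--         if "experiment:" in line and ":start" in line: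
--             return "training/evaluating"
--         if "run:done" in line:
--             return "idle"
--         if "run:start" in line:
--             return "starting"
--         return None
--     result = "unknown"
--     for line in log_tail:
--         s = line_status(line)
--         if s is not None:
--             result = s
--     return result
-- ===== Notes on version B (the rewrite author's own statement) =====
-- stated objective: alternative
-- what changed: Replaces the reversed-iteration early-return loop with a forward single pass that keeps an accumulator and overwrites it on each matching line, so the last (most recent) match wins without reversing or returning early.
import Mathlib
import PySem

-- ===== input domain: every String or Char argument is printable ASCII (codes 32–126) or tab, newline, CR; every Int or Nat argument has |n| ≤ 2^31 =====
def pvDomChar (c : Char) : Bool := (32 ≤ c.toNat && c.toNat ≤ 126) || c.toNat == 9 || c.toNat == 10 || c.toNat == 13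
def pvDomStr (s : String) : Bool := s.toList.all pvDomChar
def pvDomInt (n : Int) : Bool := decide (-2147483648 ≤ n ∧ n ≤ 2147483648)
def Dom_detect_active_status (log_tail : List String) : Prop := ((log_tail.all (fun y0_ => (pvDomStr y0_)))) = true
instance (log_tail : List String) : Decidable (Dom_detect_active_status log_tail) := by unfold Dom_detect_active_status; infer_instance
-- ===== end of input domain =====

-- B: forward single pass with an overwriting accumulator instead of A's reversed early-return loop; same return value.
-- ===== PORT A =====
def detect_active_status_go : List String → String
  | [] => "unknown"
  | line :: rest =>
    if PySem.Str.isIn "review:start" line then "reviewing"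
    else if PySem.Str.isIn "experiment:" line && PySem.Str.isIn ":start" line then "training/evaluating"
    else if PySem.Str.isIn "run:done" line then "idle"
    else if PySem.Str.isIn "run:start" line then "starting"
    else detect_active_status_go rest

def detect_active_status (log_tail : List String) : String :=
  detect_active_status_go log_tail.reverse

-- ===== PORT B =====
def lineStatus (line : String) : Option String :=
  if PySem.Str.isIn "review:start" line then some "reviewing"
  else if PySem.Str.isIn "experiment:" line && PySem.Str.isIn ":start" line then some "training/evaluating"
  else if PySem.Str.isIn "run:done" line then some "idle"
  else if PySem.Str.isIn "run:start" line then some "starting"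
  else none

def detect_active_status_alt (log_tail : List String) : String :=
  log_tail.foldl
    (fun result line => match lineStatus line with | some s => s | none => result)
    "unknown"

-- ===== PRECONDITION & SPEC =====
def Spec_detect_active_status (log_tail : List String) (out : String) : Prop := out = detect_active_status_alt log_tail
instance (log_tail : List String) (out : String) : Decidable (Spec_detect_active_status log_tail out) := by unfold Spec_detect_active_status; infer_instance

-- ===== CLAIM (what is proved, stated in full; the proofs are below) =====
def Claim_equal_detect_active_status : Prop := ∀ (log_tail : List String), Dom_detect_active_status log_tail → Spec_detect_active_status log_tail (detect_active_status log_tail)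

-- ===== LEMMAS AND PROOFS =====

-- ===== VERDICT (by name: the statement is the Claim_ definition above) =====
-- first match scanning from the head, as an Option
def goOpt : List String → Option String
  | [] => none
  | l :: rest => (lineStatus l).or (goOpt rest)

theorem go_eq_goOpt (ys : List String) :
    detect_active_status_go ys = (goOpt ys).getD "unknown" := by
  induction ys with
  | nil => rfl
  | cons l rest ih =>
    simp only [detect_active_status_go, goOpt, lineStatus]
    split_ifs <;> simp [ih]

theorem goOpt_append (ys : List String) (x : String) :
    goOpt (ys ++ [x]) = (goOpt ys).or (lineStatus x) := by
  induction ys with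
  | nil => simp [goOpt]
  | cons l rest ih => simp [goOpt, ih, Option.or_assoc]

theorem foldl_eq_goOpt (xs : List String) (acc : String) :
    xs.foldl
      (fun result line => match lineStatus line with | some s => s | none => result)
      acc = (goOpt xs.reverse).getD acc := by
  induction xs generalizing acc with
  | nil => rfl
  | cons x rest ih =>
    simp only [List.foldl_cons, List.reverse_cons, goOpt_append, ih]
    cases goOpt rest.reverse <;> cases lineStatus x <;> simp [Option.or]

theorem detect_active_status_spec : Claim_equal_detect_active_status := by
  intro log_tail _
  unfold Spec_detect_active_status detect_active_status detect_active_status_alt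
  rw [go_eq_goOpt, foldl_eq_goOpt]
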